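-- pv_equiv track=rewrite | github.com/lisanping/agentic-literature-review | backend/app/agents/analyst_agent.py | _find_closest_group
-- ===== SOURCE A (Python) =====
-- def _find_closest_group(paper: dict, groups: list[list[dict]]) -> list[dict]:
--     """Find the group with highest concept overlap to a paper."""
--     paper_concepts = set(paper.get("key_concepts") or [])
--     best_score = -1
--     best_group = groups[0]
--     for group in groups:
--         group_concepts: set[str] = set()
--         for p in group:
--             group_concepts.update(p.get("key_concepts") or [])
--         score = len(paper_concepts & group_concepts)
--         if score > best_score:
--             best_score = score
--             best_group = group
--     return best_group
-- ===== SOURCE B (Python) =====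
-- def _find_closest_group(paper: dict, groups: list[list[dict]]) -> list[dict]:
--     """Find the group with highest concept overlap to a paper, via an inverted
--     concept -> group-indices index instead of per-group set unions."""
--     paper_concepts = set(paper.get("key_concepts") or [])
--     concept_to_groups: dict[str, set[int]] = {}
--     for gi, group in enumerate(groups):
--         for p in group:
--             for c in (p.get("key_concepts") or []):
--                 concept_to_groups.setdefault(c, set()).add(gi)
--     counts = [0] * len(groups)
--     for c in paper_concepts:
--         for gi in concept_to_groups.get(c, ()):
--             counts[gi] += 1
--     best_score = -1
--     best_index = 0
--     for gi, cnt in enumerate(counts):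
--         if cnt > best_score:
--             best_score = cnt
--             best_index = gi
--     return groups[best_index]
-- ===== Notes on version B (the rewrite author's own statement) =====
-- stated objective: alternative
-- what changed: Replaces the per-group set-union + set-intersection scoring loop by an inverted index concept -> set of group indices built in one pass, a counts array tallied from the paper's concepts through that index, and a first-wins argmax over the counts.
import Mathlib
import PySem

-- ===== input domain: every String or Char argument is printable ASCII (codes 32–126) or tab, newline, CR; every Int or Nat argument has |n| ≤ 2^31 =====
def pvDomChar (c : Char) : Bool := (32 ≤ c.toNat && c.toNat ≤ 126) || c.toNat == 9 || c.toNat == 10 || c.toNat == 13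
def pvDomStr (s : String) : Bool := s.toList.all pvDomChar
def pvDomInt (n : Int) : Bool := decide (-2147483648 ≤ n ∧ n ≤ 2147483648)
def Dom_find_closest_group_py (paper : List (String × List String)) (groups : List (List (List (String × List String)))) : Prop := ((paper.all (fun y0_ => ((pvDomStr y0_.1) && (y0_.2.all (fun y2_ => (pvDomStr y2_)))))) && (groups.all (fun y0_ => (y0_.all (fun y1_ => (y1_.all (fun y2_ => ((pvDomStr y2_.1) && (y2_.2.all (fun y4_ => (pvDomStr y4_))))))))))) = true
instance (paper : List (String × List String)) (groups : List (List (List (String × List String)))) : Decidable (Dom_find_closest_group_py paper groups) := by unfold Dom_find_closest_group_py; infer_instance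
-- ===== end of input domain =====

-- B replaces A's per-group set-union + intersection scoring by an inverted index
-- (concept -> set of group indices) and a counts array; same result, alternative algorithm.
-- B's iteration over the Python set paper_concepts is order-independent (commutative increments).

-- p.get("key_concepts") or []  — first-match assoc lookup; a [] value is falsy, so `or []` collapses to a default of []
def pvKC (p : List (String × List String)) : List String :=
  (List.lookup "key_concepts" p).getD []

-- ===== PORT A =====
def find_closest_group_py (paper : List (String × List String)) (groups : List (List (List (String × List String)))) : List (List (String × List String)) :=
  let paper_concepts : PySem.Set String := PySem.Set.ofList (pvKC paper)
  -- best_group = groups[0]: on groups = [] Python raises IndexError (excluded by Pre_); the .getD [] default is unreached there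
  let init : Int × List (List (String × List String)) := (-1, (PySem.List.pyGet? groups 0).getD [])
  let res := groups.foldl (fun st group =>
    let group_concepts : PySem.Set String :=
      group.foldl (fun s p => PySem.Set.update s (pvKC p)) PySem.Set.empty
    let score : Int := PySem.Set.len (PySem.Set.inter paper_concepts group_concepts)
    if score > st.1 then (score, group) else st) init
  res.2

-- ===== PORT B =====
def find_closest_group_py_alt (paper : List (String × List String)) (groups : List (List (List (String × List String)))) : List (List (String × List String)) :=
  let paper_concepts : PySem.Set String := PySem.Set.ofList (pvKC paper)
  -- concept_to_groups.setdefault(c, set()).add(gi)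
  let idx : PySem.Dict String (PySem.Set Int) :=
    (PySem.List.enumerate groups).foldl (fun d gig =>
      gig.2.foldl (fun d p =>
        (pvKC p).foldl (fun d c =>
          d.insert c (PySem.Set.add (d.getD c PySem.Set.empty) gig.1)) d) d) PySem.Dict.empty
  let counts0 : List Int := List.replicate groups.length 0
  -- for c in paper_concepts: for gi in idx.get(c, ()): counts[gi] += 1   (order-independent, so Set order is safe)
  let counts := paper_concepts.foldl (fun cnts c =>
    (idx.getD c PySem.Set.empty).foldl (fun cnts gi =>
      PySem.List.pySetD cnts gi (PySem.List.pyGetD cnts gi 0 + 1)) cnts) counts0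
  let best := (PySem.List.enumerate counts).foldl (fun st gic =>
      if gic.2 > st.1 then (gic.2, gic.1) else st) ((-1 : Int), (0 : Int))
  -- groups[best_index]: on groups = [] Python raises IndexError (excluded by Pre_)
  (PySem.List.pyGet? groups best.2).getD []

-- ===== PRECONDITION & SPEC =====
-- Pre_ excludes exactly groups = [], where Python A raises IndexError on groups[0]
def Pre_find_closest_group_py (paper : List (String × List String)) (groups : List (List (List (String × List String)))) : Prop := groups ≠ []
instance (paper : List (String × List String)) (groups : List (List (List (String × List String)))) : Decidable (Pre_find_closest_group_py paper groups) := by unfold Pre_find_closest_group_py; infer_instance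
def pvWitness_find_closest_group_py : (List (String × List String)) × (List (List (List (String × List String)))) :=
  ([("key_concepts", ["a", "b"])], [[[("key_concepts", ["c"])]], [[("key_concepts", ["a"])]]])
def Spec_find_closest_group_py (paper : List (String × List String)) (groups : List (List (List (String × List String)))) (out : List (List (String × List String))) : Prop := out = find_closest_group_py_alt paper groups
instance (paper : List (String × List String)) (groups : List (List (List (String × List String)))) (out : List (List (String × List String))) : Decidable (Spec_find_closest_group_py paper groups out) := by unfold Spec_find_closest_group_py; infer_instance

-- ===== CLAIM (what is proved, stated in full; the proofs are below) =====
def Claim_equal_find_closest_group_py : Prop := ∀ (paper : List (String × List String)) (groups : List (List (List (String × List String)))), Dom_find_closest_group_py paper groups → Pre_find_closest_group_py paper groups → Spec_find_closest_group_py paper groups (find_closest_group_py paper groups)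

-- ===== LEMMAS AND PROOFS =====

-- c is a key-concept of some paper of group g
def pvInG (g : List (List (String × List String))) (c : String) : Bool :=
  g.any (fun p => (pvKC p).contains c)

-- the common score: number of paper concepts present in the group
def pvSc (pc : List String) (g : List (List (String × List String))) : Int :=
  (pc.countP (fun c => pvInG g c) : Int)

theorem pv_mem_gc_fold (g : List (List (String × List String))) (s : PySem.Set String) (c : String) :
    c ∈ g.foldl (fun s p => PySem.Set.update s (pvKC p)) s ↔ c ∈ s ∨ pvInG g c = true := by
  induction g generalizing s with
  | nil => simp [pvInG]
  | cons p g ih =>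
    rw [List.foldl_cons, ih, PySem.Set.mem_update]
    simp [pvInG, List.any_cons]
    tauto

theorem pv_score_eq (pc : List String) (g : List (List (String × List String))) :
    PySem.Set.len (PySem.Set.inter pc (g.foldl (fun s p => PySem.Set.update s (pvKC p)) PySem.Set.empty)) = pvSc pc g := by
  show ((pc.filter fun c => (g.foldl (fun s p => PySem.Set.update s (pvKC p)) PySem.Set.empty).contains c).length : Int) = _
  rw [pvSc, List.countP_eq_length_filter]
  have h : List.filter (fun c => (g.foldl (fun s p => PySem.Set.update s (pvKC p)) PySem.Set.empty).contains c) pc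
      = List.filter (fun c => pvInG g c) pc := by
    apply List.filter_congr
    intro c _
    rw [Bool.eq_iff_iff, PySem.Set.contains_iff, pv_mem_gc_fold]
    simp [PySem.Set.empty]
  rw [h]

theorem pvA_eq (paper : List (String × List String)) (groups : List (List (List (String × List String)))) :
    find_closest_group_py paper groups =
      (groups.foldl (fun st g => if pvSc (PySem.Set.ofList (pvKC paper)) g > st.1 then (pvSc (PySem.Set.ofList (pvKC paper)) g, g) else st)
        (-1, (PySem.List.pyGet? groups 0).getD [])).2 := by
  simp only [find_closest_group_py]
  congr 1
  apply PySem.List.foldl_congr_mem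
  intro acc g _
  simp only [pv_score_eq]

-- invariant of the index: values are nodup lists of nonneg ints
def pvPI (d : PySem.Dict String (PySem.Set Int)) : Prop :=
  ∀ c, (d.getD c PySem.Set.empty).Nodup ∧ ∀ gi ∈ d.getD c PySem.Set.empty, 0 ≤ gi

theorem pvPI_L1 (cs : List String) (g0 : Int) (h0 : 0 ≤ g0) :
    ∀ d, pvPI d → pvPI (cs.foldl (fun d c => d.insert c (PySem.Set.add (d.getD c PySem.Set.empty) g0)) d) := by
  induction cs with
  | nil => intro d h; exact h
  | cons c cs ih =>
    intro d h
    rw [List.foldl_cons]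
    apply ih
    intro c'
    rw [PySem.Dict.getD_insert]
    split
    · refine ⟨PySem.Set.nodup_add _ _ (h c).1, ?_⟩
      intro gi hgi
      rcases (PySem.Set.mem_add _ _ _).1 hgi with h' | h'
      · exact (h c).2 gi h'
      · omega
    · exact h c'

theorem pvPI_L2 (g : List (List (String × List String))) (g0 : Int) (h0 : 0 ≤ g0) :
    ∀ d, pvPI d → pvPI (g.foldl (fun d p => (pvKC p).foldl (fun d c => d.insert c (PySem.Set.add (d.getD c PySem.Set.empty) g0)) d) d) := by
  induction g with
  | nil => intro d h; exact h
  | cons p g ih =>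
    intro d h
    rw [List.foldl_cons]
    exact ih _ (pvPI_L1 _ _ h0 _ h)

theorem pvPI_L3 (l : List (Int × List (List (String × List String)))) (hl : ∀ pr ∈ l, 0 ≤ pr.1) :
    ∀ d, pvPI d → pvPI (l.foldl (fun d gig => gig.2.foldl (fun d p => (pvKC p).foldl (fun d c => d.insert c (PySem.Set.add (d.getD c PySem.Set.empty) gig.1)) d) d) d) := by
  induction l with
  | nil => intro d h; exact h
  | cons pr l ih =>
    intro d h
    rw [List.foldl_cons]
    exact ih (fun q hq => hl q (List.mem_cons_of_mem _ hq)) _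
      (pvPI_L2 _ _ (hl pr List.mem_cons_self) _ h)

theorem pv_mem_L1 (cs : List String) (g0 : Int) :
    ∀ (d : PySem.Dict String (PySem.Set Int)) (c : String) (gi : Int),
      gi ∈ (cs.foldl (fun d c => d.insert c (PySem.Set.add (d.getD c PySem.Set.empty) g0)) d).getD c PySem.Set.empty ↔
        gi ∈ d.getD c PySem.Set.empty ∨ (c ∈ cs ∧ gi = g0) := by
  induction cs with
  | nil => simp
  | cons c' cs ih =>
    intro d c gi
    rw [List.foldl_cons, ih, PySem.Dict.getD_insert]
    by_cases hc : c = c'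
    · subst hc
      rw [if_pos rfl, PySem.Set.mem_add]
      simp
      tauto
    · rw [if_neg hc]
      simp [hc]

theorem pv_mem_L2 (g : List (List (String × List String))) (g0 : Int) :
    ∀ (d : PySem.Dict String (PySem.Set Int)) (c : String) (gi : Int),
      gi ∈ (g.foldl (fun d p => (pvKC p).foldl (fun d c => d.insert c (PySem.Set.add (d.getD c PySem.Set.empty) g0)) d) d).getD c PySem.Set.empty ↔
        gi ∈ d.getD c PySem.Set.empty ∨ (pvInG g c = true ∧ gi = g0) := by
  induction g with
  | nil => simp [pvInG]
  | cons p g ih =>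
    intro d c gi
    rw [List.foldl_cons, ih, pv_mem_L1]
    simp [pvInG, List.any_cons]
    tauto

theorem pv_mem_L3 (l : List (Int × List (List (String × List String)))) :
    ∀ (d : PySem.Dict String (PySem.Set Int)) (c : String) (gi : Int),
      gi ∈ (l.foldl (fun d gig => gig.2.foldl (fun d p => (pvKC p).foldl (fun d c => d.insert c (PySem.Set.add (d.getD c PySem.Set.empty) gig.1)) d) d) d).getD c PySem.Set.empty ↔
        gi ∈ d.getD c PySem.Set.empty ∨ ∃ pr ∈ l, pvInG pr.2 c = true ∧ gi = pr.1 := by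
  induction l with
  | nil => simp
  | cons pr l ih =>
    intro d c gi
    rw [List.foldl_cons, ih, pv_mem_L2]
    simp
    tauto

-- a foldl of counts[gi] += 1 over a nodup list of nonneg indices adds 1 at each member
theorem pv_incr_len (s : List Int) : ∀ cnts : List Int,
    (s.foldl (fun cnts gi => PySem.List.pySetD cnts gi (PySem.List.pyGetD cnts gi 0 + 1)) cnts).length = cnts.length := by
  induction s with
  | nil => intro cnts; rfl
  | cons gi s ih => intro cnts; simp [List.foldl, ih, PySem.List.length_pySetD]

theorem pv_incr_fold (s : List Int) :
    ∀ (cnts : List Int), s.Nodup → (∀ gi ∈ s, 0 ≤ gi) → ∀ j : Nat, j < cnts.length →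
      (s.foldl (fun cnts gi => PySem.List.pySetD cnts gi (PySem.List.pyGetD cnts gi 0 + 1)) cnts).getD j 0 =
        cnts.getD j 0 + (if (j : Int) ∈ s then 1 else 0) := by
  induction s with
  | nil => intro cnts _ _ j hj; simp
  | cons gi s ih =>
    intro cnts hnd hnn j hj
    have hgi : 0 ≤ gi := hnn gi List.mem_cons_self
    rw [List.foldl_cons, PySem.List.pySetD_of_nonneg _ _ hgi,
        PySem.List.pyGetD_of_nonneg _ _ hgi]
    rw [ih _ hnd.of_cons (fun x hx => hnn x (List.mem_cons_of_mem _ hx)) j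
        (by rw [List.length_set]; exact hj)]
    have hset : (cnts.set gi.toNat (cnts.getD gi.toNat 0 + 1)).getD j 0 =
        cnts.getD j 0 + (if (j : Int) = gi then 1 else 0) := by
      rw [List.getD_eq_getElem?_getD, List.getD_eq_getElem?_getD, List.getElem?_set]
      by_cases hji : (j : Int) = gi
      · have h1 : gi.toNat = j := by omega
        rw [if_pos h1, if_pos (h1 ▸ (by omega : gi.toNat < cnts.length)), if_pos hji]
        rw [List.getD_eq_getElem?_getD, h1]
        cases h : cnts[j]? with
        | none => exact absurd (List.getElem?_eq_none_iff.1 h) (by omega)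
        | some v => simp
      · have h1 : gi.toNat ≠ j := by omega
        rw [if_neg h1, if_neg hji]
        simp
    rw [hset]
    have hnin : gi ∉ s := (List.nodup_cons.1 hnd).1
    by_cases hji : (j : Int) = gi
    · have hjs : (j : Int) ∉ s := fun h => hnin (hji ▸ h)
      rw [if_pos hji, if_neg hjs, if_pos (List.mem_cons.2 (Or.inl hji))]
      ring
    · rw [if_neg hji]
      by_cases hjs : (j : Int) ∈ s
      · rw [if_pos hjs, if_pos (List.mem_cons.2 (Or.inr hjs))]
        ring
      · rw [if_neg hjs, if_neg (by simp [hji, hjs])]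
        ring

theorem pv_counts_len (idx : PySem.Dict String (PySem.Set Int)) (l : List String) :
    ∀ cnts : List Int,
      (l.foldl (fun cnts c => (idx.getD c PySem.Set.empty).foldl (fun cnts gi => PySem.List.pySetD cnts gi (PySem.List.pyGetD cnts gi 0 + 1)) cnts) cnts).length = cnts.length := by
  induction l with
  | nil => intro cnts; rfl
  | cons c l ih => intro cnts; rw [List.foldl_cons, ih, pv_incr_len]

theorem pv_counts_fold (idx : PySem.Dict String (PySem.Set Int)) (hP : pvPI idx) (l : List String) :
    ∀ (cnts : List Int) (j : Nat), j < cnts.length →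
      (l.foldl (fun cnts c => (idx.getD c PySem.Set.empty).foldl (fun cnts gi => PySem.List.pySetD cnts gi (PySem.List.pyGetD cnts gi 0 + 1)) cnts) cnts).getD j 0 =
        cnts.getD j 0 + (l.countP (fun c => (idx.getD c PySem.Set.empty).contains (j : Int)) : Int) := by
  induction l with
  | nil => intro cnts j hj; simp
  | cons c l ih =>
    intro cnts j hj
    rw [List.foldl_cons, ih _ j (by rw [pv_incr_len]; exact hj),
        pv_incr_fold _ _ (hP c).1 (hP c).2 j hj, List.countP_cons]
    have : ((idx.getD c PySem.Set.empty).contains (j : Int) = true) ↔ (j : Int) ∈ idx.getD c PySem.Set.empty :=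
      PySem.Set.contains_iff _ _
    push_cast
    split_ifs with h1 h2 h3
    · ring
    · exact absurd (this.2 h1) h2
    · exact absurd (this.1 h3) h1
    · ring

theorem pv_arg_corr (groups : List (List (List (String × List String)))) (pc : List String) :
    ∀ (gs : List (List (List (String × List String)))) (k : Nat) (b : Int) (gA : List (List (String × List String))) (bi : Int),
      List.drop k groups = gs →
      (PySem.List.pyGet? groups bi).getD [] = gA →
      (PySem.List.pyGet? groups
          (((PySem.List.enumerate (gs.map (pvSc pc)) (k : Int)).foldl (fun st gic => if gic.2 > st.1 then (gic.2, gic.1) else st) (b, bi)).2)).getD []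
        = (gs.foldl (fun st g => if pvSc pc g > st.1 then (pvSc pc g, g) else st) (b, gA)).2 := by
  intro gs
  induction gs with
  | nil =>
    intro k b gA bi _ h2
    simpa [PySem.List.enumerate_nil] using h2
  | cons g gs ih =>
    intro k b gA bi h1 h2
    have hk : groups[k]? = some g := by
      have h : (List.drop k groups)[0]? = groups[k + 0]? := List.getElem?_drop
      rw [h1] at h
      simpa using h.symm
    have hdrop : List.drop (k + 1) groups = gs := by
      have h := congrArg (List.drop 1) h1
      rw [List.drop_drop] at h
      simpa [Nat.add_comm] using h
    have hcast : (k : Int) + 1 = ((k + 1 : Nat) : Int) := by push_cast; ring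
    rw [List.map_cons, PySem.List.enumerate_cons, List.foldl_cons, List.foldl_cons, hcast]
    by_cases hcond : pvSc pc g > b
    · simp only [if_pos hcond]
      exact ih (k + 1) _ _ _ hdrop (by rw [PySem.List.pyGet?_natCast, hk]; rfl)
    · simp only [if_neg hcond]
      exact ih (k + 1) _ _ _ hdrop h2

theorem pvB_eq (paper : List (String × List String)) (groups : List (List (List (String × List String)))) :
    find_closest_group_py_alt paper groups =
      (groups.foldl (fun st g => if pvSc (PySem.Set.ofList (pvKC paper)) g > st.1 then (pvSc (PySem.Set.ofList (pvKC paper)) g, g) else st)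
        (-1, (PySem.List.pyGet? groups 0).getD [])).2 := by
  simp only [find_closest_group_py_alt]
  set pc : List String := PySem.Set.ofList (pvKC paper) with hpc
  set idx : PySem.Dict String (PySem.Set Int) :=
    (PySem.List.enumerate groups).foldl (fun d gig =>
      gig.2.foldl (fun d p =>
        (pvKC p).foldl (fun d c =>
          d.insert c (PySem.Set.add (d.getD c PySem.Set.empty) gig.1)) d) d) PySem.Dict.empty with hidx
  have hPI : pvPI idx := by
    rw [hidx]
    apply pvPI_L3
    · intro pr hpr
      rcases (PySem.List.mem_enumerate_iff _ _ _).1 hpr with ⟨k, hk, hpr⟩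
      rw [hpr]
      simp
    · intro c
      simp [PySem.Dict.getD_empty, PySem.Set.empty]
  have hmem : ∀ (c : String) (j : Nat), j < groups.length →
      ((idx.getD c PySem.Set.empty).contains (j : Int) = pvInG (groups.getD j []) c) := by
    intro c j hj
    rw [Bool.eq_iff_iff, PySem.Set.contains_iff, hidx, pv_mem_L3]
    simp only [PySem.Dict.getD_empty, PySem.Set.empty, List.not_mem_nil, false_or]
    constructor
    · rintro ⟨pr, hpr, hin, hji⟩
      rcases (PySem.List.mem_enumerate_iff _ _ _).1 hpr with ⟨k, hk, hpr⟩
      rw [hpr] at hin hji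
      simp only at hin hji
      have : k = j := by omega
      subst this
      rwa [List.getD_eq_getElem _ _ hk]
    · intro hin
      refine ⟨((j : Int), groups.getD j []), ?_, hin, by simp⟩
      rw [PySem.List.mem_enumerate_iff]
      exact ⟨j, hj, by rw [List.getD_eq_getElem _ _ hj]; simp⟩
  set counts := pc.foldl (fun cnts c =>
    (idx.getD c PySem.Set.empty).foldl (fun cnts gi =>
      PySem.List.pySetD cnts gi (PySem.List.pyGetD cnts gi 0 + 1)) cnts) (List.replicate groups.length (0 : Int)) with hcounts
  have hlen : counts.length = groups.length := by
    rw [hcounts, pv_counts_len, List.length_replicate]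
  have hcnt : counts = groups.map (fun g => pvSc pc g) := by
    apply List.ext_getElem
    · rw [hlen, List.length_map]
    · intro j hj hj'
      have hjg : j < groups.length := by rwa [hlen] at hj
      have h1 : counts.getD j 0 = counts[j] := List.getD_eq_getElem _ _ hj
      rw [← h1, hcounts, pv_counts_fold idx hPI _ _ j (by rwa [List.length_replicate])]
      have h2 : (List.replicate groups.length (0 : Int)).getD j 0 = 0 := by
        rw [List.getD_eq_getElem _ _ (by rwa [List.length_replicate]), List.getElem_replicate]
      rw [h2, zero_add]
      have h3 : (pc.countP fun c => (idx.getD c PySem.Set.empty).contains (j : Int)) =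
          pc.countP (fun c => pvInG (groups.getD j []) c) := by
        apply List.countP_congr
        intro c _
        rw [hmem c j hjg]
      rw [h3]
      rw [List.getElem_map]
      rw [pvSc, List.getD_eq_getElem _ _ hjg]
  rw [hcnt]
  have := pv_arg_corr groups pc groups 0 (-1) ((PySem.List.pyGet? groups 0).getD []) 0 (by simp) rfl
  simpa using this

-- ===== VERDICT (by name: the statement is the Claim_ definition above) =====
theorem find_closest_group_py_spec : Claim_equal_find_closest_group_py := by
  intro paper groups _ _
  unfold Spec_find_closest_group_py
  rw [pvA_eq, pvB_eq]
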